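-- pv_equiv track=rewrite | github.com/deep-bridge-info/Pricing-and-Predicting-model-of-goods | pipeline/extractor.py | apply_consolidated_schema
-- ===== SOURCE A (Python) =====
-- from typing import Any, Dict, List, Optional, Set
--
-- def apply_consolidated_schema(
--     all_attrs: List[Dict[str, Any]], schema: Dict
-- ) -> List[Dict[str, Any]]:
--     """Remap product attributes using the consolidated schema.
--
--     For each product, maps original attribute keys to canonical names.
--     """
--     result = []
--     for attrs in all_attrs:
--         mapped = {}
--         for canonical, info in schema.items():
--             source_keys = info.get("source_keys", [canonical])
--             for sk in source_keys:
--                 if sk in attrs: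
--                     mapped[canonical] = attrs[sk]
--                     break
--         result.append(mapped)
--     return result
-- ===== SOURCE B (Python) =====
-- def apply_consolidated_schema(all_attrs, schema):
--     """Remap product attributes using the consolidated schema.
--
--     Inverted-index version: precompute source_key -> [(schema position,
--     priority)] once, then per product scan only the attributes present,
--     keeping the lowest-priority hit per schema position, and emit the
--     mapped dict in schema order.
--     """
--     canonicals = []
--     index = {}  # source_key -> [(pos, pri)] in ascending (pos, pri) order
--     pos = 0
--     for canonical, info in schema.items():
--         canonicals.append(canonical)
--         pri = 0
--         for sk in info.get("source_keys", [canonical]):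
--             index[sk] = index.get(sk, []) + [(pos, pri)]
--             pri += 1
--         pos += 1
--     result = []
--     for attrs in all_attrs:
--         best = {}  # pos -> (pri, value) of the best source key seen so far
--         for k, v in attrs.items():
--             for p, q in index.get(k, []):
--                 if p not in best or q < best[p][0]:
--                     best[p] = (q, v)
--         mapped = {}
--         for p in range(len(canonicals)):
--             if p in best:
--                 mapped[canonicals[p]] = best[p][1]
--         result.append(mapped)
--     return result
-- ===== Notes on version B (the rewrite author's own statement) =====
-- stated objective: faster
-- what changed: Replaces A's per-product rescan of every schema entry's full source-key list by a once-precomputed inverted source_key->(schema position, priority) index; each product then scans only its present attributes, keeps the lowest-priority hit per schema position, and emits the mapped dict in schema order.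
import Mathlib
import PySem

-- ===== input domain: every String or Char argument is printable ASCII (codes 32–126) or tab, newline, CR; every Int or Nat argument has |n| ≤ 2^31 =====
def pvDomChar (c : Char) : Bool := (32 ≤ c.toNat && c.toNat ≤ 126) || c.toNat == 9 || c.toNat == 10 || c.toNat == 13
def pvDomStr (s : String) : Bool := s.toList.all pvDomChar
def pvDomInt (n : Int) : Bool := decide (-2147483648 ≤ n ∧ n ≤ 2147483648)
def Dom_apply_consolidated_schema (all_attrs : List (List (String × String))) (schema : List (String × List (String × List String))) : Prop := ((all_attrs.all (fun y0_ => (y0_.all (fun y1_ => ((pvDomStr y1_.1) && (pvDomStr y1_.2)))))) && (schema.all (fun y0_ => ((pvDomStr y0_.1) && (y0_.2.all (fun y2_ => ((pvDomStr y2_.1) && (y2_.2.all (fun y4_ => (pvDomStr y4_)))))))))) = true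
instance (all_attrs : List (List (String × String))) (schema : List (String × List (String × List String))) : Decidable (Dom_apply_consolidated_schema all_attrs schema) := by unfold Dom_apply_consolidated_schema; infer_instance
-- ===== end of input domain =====

-- B replaces A's per-product scan over every schema entry's full source-key list by a
-- precomputed inverted source_key → (schema position, priority) index; same return value.

-- ===== PORT A =====
-- 'for sk in source_keys: if sk in attrs: … attrs[sk]; break' — first source key that is a
-- key of attrs, returning its value (the 'in' test + indexing is one first-match lookup).
def aPick (attrs : List (String × String)) : List String → Option String
  | [] => none
  | sk :: rest =>
      match (PySem.Dict.mk attrs).get? sk with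
      | some v => some v
      | none => aPick attrs rest

-- body of 'for canonical, info in schema.items(): …' building 'mapped'
def aProd (attrs : List (String × String)) (schema : List (String × List (String × List String))) : List (String × String) :=
  (schema.foldl
    (fun (mapped : PySem.Dict String String) e =>
      match aPick attrs ((PySem.Dict.mk e.2).getD "source_keys" [e.1]) with
      | some v => mapped.insert e.1 v
      | none => mapped)
    PySem.Dict.empty).items

def apply_consolidated_schema (all_attrs : List (List (String × String))) (schema : List (String × List (String × List String))) : List (List (String × String)) :=
  all_attrs.foldl (fun result attrs => result ++ [aProd attrs schema]) []

-- ===== PORT B =====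
-- 'for sk in info.get("source_keys",[canonical]): index[sk] = index.get(sk,[]) + [(pos,pri)]; pri += 1'
def bAddSks (p : Nat) : PySem.Dict String (List (Nat × Nat)) → Nat → List String → PySem.Dict String (List (Nat × Nat))
  | idx, _, [] => idx
  | idx, q, sk :: rest => bAddSks p (idx.insert sk (idx.getD sk [] ++ [(p, q)])) (q + 1) rest

-- 'for canonical, info in schema.items(): canonicals.append(canonical); …; pos += 1'
def bBuild : PySem.Dict String (List (Nat × Nat)) → List String → Nat → List (String × List (String × List String)) → List String × PySem.Dict String (List (Nat × Nat))
  | idx, cs, _, [] => (cs, idx)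
  | idx, cs, p, (c, info) :: rest =>
      bBuild (bAddSks p idx 0 ((PySem.Dict.mk info).getD "source_keys" [c])) (cs ++ [c]) (p + 1) rest

-- 'for p, q in index.get(k, []): if p not in best or q < best[p][0]: best[p] = (q, v)'
def bUpd (v : String) : PySem.Dict Nat (Nat × String) → List (Nat × Nat) → PySem.Dict Nat (Nat × String)
  | best, [] => best
  | best, (p, q) :: rest =>
      bUpd v
        (match best.get? p with
         | none => best.insert p (q, v)
         | some (q0, _) => if q < q0 then best.insert p (q, v) else best)
        rest

-- 'best = {}; for k, v in attrs.items(): …'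
def bBest (idx : PySem.Dict String (List (Nat × Nat))) (attrs : List (String × String)) : PySem.Dict Nat (Nat × String) :=
  attrs.foldl (fun best kv => bUpd kv.2 best (idx.getD kv.1 [])) PySem.Dict.empty

-- 'mapped = {}; for p in range(len(canonicals)): if p in best: mapped[canonicals[p]] = best[p][1]'
def bProd (canonicals : List String) (idx : PySem.Dict String (List (Nat × Nat))) (attrs : List (String × String)) : List (String × String) :=
  let best := bBest idx attrs
  ((List.range canonicals.length).foldl
    (fun (mapped : PySem.Dict String String) p =>
      match best.get? p with
      | some qv => mapped.insert (canonicals.getD p "") qv.2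
      | none => mapped)
    PySem.Dict.empty).items

def apply_consolidated_schema_alt (all_attrs : List (List (String × String))) (schema : List (String × List (String × List String))) : List (List (String × String)) :=
  let ci := bBuild PySem.Dict.empty [] 0 schema
  all_attrs.foldl (fun result attrs => result ++ [bProd ci.1 ci.2 attrs]) []

-- ===== PRECONDITION & SPEC =====
def Spec_apply_consolidated_schema (all_attrs : List (List (String × String))) (schema : List (String × List (String × List String))) (out : List (List (String × String))) : Prop := out = apply_consolidated_schema_alt all_attrs schema
instance (all_attrs : List (List (String × String))) (schema : List (String × List (String × List String))) (out : List (List (String × String))) : Decidable (Spec_apply_consolidated_schema all_attrs schema out) := by unfold Spec_apply_consolidated_schema; infer_instance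

-- ===== CLAIM (what is proved, stated in full; the proofs are below) =====
def Claim_equal_apply_consolidated_schema : Prop := ∀ (all_attrs : List (List (String × String))) (schema : List (String × List (String × List String))), Dom_apply_consolidated_schema all_attrs schema → Spec_apply_consolidated_schema all_attrs schema (apply_consolidated_schema all_attrs schema)

-- ===== LEMMAS AND PROOFS =====

-- the source-key list of one schema entry
def sksOf (e : String × List (String × List String)) : List String :=
  (PySem.Dict.mk e.2).getD "source_keys" [e.1]

-- first (priority, value) hit of A's inner loop, priorities counted from p
def firstHitP (attrs : List (String × String)) : Nat → List String → Option (Nat × String)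
  | _, [] => none
  | p, sk :: rest =>
      match (PySem.Dict.mk attrs).get? sk with
      | some v => some (p, v)
      | none => firstHitP attrs (p + 1) rest

-- priorities (counted from q) at which key k occurs in a source-key list
def prisFrom (k : String) : Nat → List String → List Nat
  | _, [] => []
  | q, sk :: rest => if sk = k then q :: prisFrom k (q + 1) rest else prisFrom k (q + 1) rest

-- all (pos, pri) occurrences of key k over a list of source-key lists, positions from p
def occsFrom (k : String) : Nat → List (List String) → List (Nat × Nat)
  | _, [] => []
  | p, sks :: rest => (prisFrom k 0 sks).map (fun q => (p, q)) ++ occsFrom k (p + 1) rest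

-- left-biased minimum-priority merge
def merge : Option (Nat × String) → Option (Nat × String) → Option (Nat × String)
  | a, none => a
  | none, some b => some b
  | some a, some b => if b.1 < a.1 then some b else some a

-- pointwise effect of bUpd at one position, over the priority list
def foldP (v : String) : Option (Nat × String) → List Nat → Option (Nat × String)
  | a, [] => a
  | a, q :: rest =>
      foldP v
        (match a with
         | none => some (q, v)
         | some (q0, w) => if q < q0 then some (q, v) else some (q0, w))
        rest

def selP (pos : Nat) (pq : Nat × Nat) : Option Nat := if pq.1 = pos then some pq.2 else none

theorem merge_none_left (b : Option (Nat × String)) : merge none b = b := by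
  cases b <;> rfl

theorem foldP_cons (v : String) (a : Option (Nat × String)) (q : Nat) (rest : List Nat) :
    foldP v a (q :: rest)
      = foldP v
          (match a with
           | none => some (q, v)
           | some (q0, w) => if q < q0 then some (q, v) else some (q0, w))
          rest := rfl

theorem merge_assoc (a b c : Option (Nat × String)) :
    merge (merge a b) c = merge a (merge b c) := by
  rcases a with _ | a <;> rcases b with _ | b <;> rcases c with _ | c <;> try rfl
  · simp only [merge]; split_ifs <;> rfl
  · by_cases h1 : b.1 < a.1 <;> by_cases h2 : c.1 < b.1 <;> by_cases h3 : c.1 < a.1 <;>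
      first
        | (exfalso; omega)
        | simp [merge, h1, h2, h3]

theorem bAddSks_getD (sks : List String) (p : Nat) (q : Nat) (idx : PySem.Dict String (List (Nat × Nat))) (k : String) :
    (bAddSks p idx q sks).getD k [] = idx.getD k [] ++ (prisFrom k q sks).map (fun q' => (p, q')) := by
  induction sks generalizing q idx with
  | nil => simp [bAddSks, prisFrom]
  | cons sk rest ih =>
      rw [bAddSks, ih]
      by_cases h : sk = k
      · subst h
        simp [prisFrom]
      · simp [prisFrom, h, Ne.symm h, PySem.Dict.getD_insert]

theorem bBuild_getD (schema : List (String × List (String × List String)))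
    (idx : PySem.Dict String (List (Nat × Nat))) (cs : List String) (p : Nat) (k : String) :
    (bBuild idx cs p schema).2.getD k [] = idx.getD k [] ++ occsFrom k p (schema.map sksOf) := by
  induction schema generalizing idx cs p with
  | nil => simp [bBuild, occsFrom]
  | cons e rest ih =>
      obtain ⟨c, info⟩ := e
      rw [bBuild, ih, bAddSks_getD]
      simp [occsFrom, sksOf]

theorem bBuild_fst (schema : List (String × List (String × List String)))
    (idx : PySem.Dict String (List (Nat × Nat))) (cs : List String) (p : Nat) :
    (bBuild idx cs p schema).1 = cs ++ schema.map Prod.fst := by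
  induction schema generalizing idx cs p with
  | nil => simp [bBuild]
  | cons e rest ih =>
      obtain ⟨c, info⟩ := e
      rw [bBuild, ih]
      simp

theorem bUpd_get? (pairs : List (Nat × Nat)) (v : String) (best : PySem.Dict Nat (Nat × String)) (pos : Nat) :
    (bUpd v best pairs).get? pos = foldP v (best.get? pos) (pairs.filterMap (selP pos)) := by
  induction pairs generalizing best with
  | nil => simp [bUpd, foldP]
  | cons pq rest ih =>
      obtain ⟨p, q⟩ := pq
      by_cases h : p = pos
      · subst h
        have h1 : List.filterMap (selP p) ((p, q) :: rest) = q :: List.filterMap (selP p) rest := by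
          rw [List.filterMap_cons]; simp [selP]
        rw [bUpd, ih, h1, foldP_cons]
        cases hb : best.get? p with
        | none => simp
        | some qw =>
            obtain ⟨q0, w⟩ := qw
            by_cases hq : q < q0 <;> simp [hq, hb]
      · have h1 : List.filterMap (selP pos) ((p, q) :: rest) = List.filterMap (selP pos) rest := by
          rw [List.filterMap_cons]; simp [selP, h]
        rw [bUpd, ih, h1]
        cases hb : best.get? p with
        | none => simp [PySem.Dict.get?_insert, Ne.symm h]
        | some qw =>
            obtain ⟨q0, w⟩ := qw
            by_cases hq : q < q0 <;> simp [hq, PySem.Dict.get?_insert, Ne.symm h]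

theorem foldP_skip (l : List Nat) (v : String) (q0 : Nat) (w : String)
    (h : ∀ q ∈ l, ¬ q < q0) : foldP v (some (q0, w)) l = some (q0, w) := by
  induction l with
  | nil => rfl
  | cons q rest ih =>
      rw [foldP_cons]
      have hq := h q (List.mem_cons_self)
      simp only [if_neg hq]
      exact ih fun x hx => h x (List.mem_cons_of_mem _ hx)

theorem foldP_sorted (l : List Nat) (v : String) (a : Option (Nat × String))
    (hs : l.Pairwise (· < ·)) :
    foldP v a l = merge a (l.head?.map (fun q => (q, v))) := by
  cases l with
  | nil => cases a <;> rfl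
  | cons q t =>
      have ht : ∀ x ∈ t, q < x := (List.pairwise_cons.mp hs).1
      rw [foldP_cons]
      rcases a with _ | ⟨q0, w⟩
      · simp only [merge_none_left, List.head?_cons, Option.map_some]
        exact foldP_skip t v q v fun x hx => by have := ht x hx; omega
      · by_cases hq : q < q0
        · simp only [if_pos hq]
          rw [foldP_skip t v q v fun x hx => by have := ht x hx; omega]
          simp [merge, hq]
        · simp only [if_neg hq]
          rw [foldP_skip t v q0 w fun x hx => by have := ht x hx; omega]
          simp [merge, hq]

theorem prisFrom_lb (sks : List String) (k : String) (q : Nat) :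
    ∀ x ∈ prisFrom k q sks, q ≤ x := by
  induction sks generalizing q with
  | nil => simp [prisFrom]
  | cons sk rest ih =>
      intro x hx
      rw [prisFrom] at hx
      by_cases h : sk = k
      · rw [if_pos h] at hx
        rcases List.mem_cons.mp hx with h' | h'
        · omega
        · have := ih (q + 1) x h'; omega
      · rw [if_neg h] at hx
        have := ih (q + 1) x hx; omega

theorem prisFrom_sorted (sks : List String) (k : String) (q : Nat) :
    (prisFrom k q sks).Pairwise (· < ·) := by
  induction sks generalizing q with
  | nil => simp [prisFrom]
  | cons sk rest ih =>
      rw [prisFrom]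
      by_cases h : sk = k
      · rw [if_pos h]
        exact List.pairwise_cons.mpr
          ⟨fun x hx => by have := prisFrom_lb rest k (q + 1) x hx; omega, ih (q + 1)⟩
      · rw [if_neg h]; exact ih (q + 1)

theorem occsFrom_filter (L : List (List String)) (k : String) (p0 pos : Nat) :
    (occsFrom k p0 L).filterMap (selP pos)
      = prisFrom k 0 (if pos < p0 then [] else L.getD (pos - p0) []) := by
  induction L generalizing p0 with
  | nil => simp [occsFrom, prisFrom]
  | cons sks rest ih =>
      rw [occsFrom, List.filterMap_append, ih (p0 + 1)]
      by_cases h : p0 = pos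
      · subst h
        have hmap : ((prisFrom k 0 sks).map (fun q => (p0, q))).filterMap (selP p0)
            = prisFrom k 0 sks := by
          simp [List.filterMap_map, selP]
        rw [hmap, if_pos (by omega), if_neg (by omega)]
        simp [prisFrom, List.getD]
      · have hmap : ((prisFrom k 0 sks).map (fun q => (p0, q))).filterMap (selP pos) = [] := by
          simp [List.filterMap_map, selP, h]
        rw [hmap, List.nil_append]
        by_cases h2 : pos < p0
        · rw [if_pos (by omega), if_pos h2]
        · rw [if_neg (by omega), if_neg h2]
          have he : pos - p0 = (pos - (p0 + 1)) + 1 := by omega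
          rw [he]
          rfl

theorem bBest_get? (attrs : List (String × String)) (idx : PySem.Dict String (List (Nat × Nat))) (pos : Nat) :
    (bBest idx attrs).get? pos
      = attrs.foldl (fun a kv => foldP kv.2 a ((idx.getD kv.1 []).filterMap (selP pos))) none := by
  have : ∀ (best : PySem.Dict Nat (Nat × String)),
      (attrs.foldl (fun best kv => bUpd kv.2 best (idx.getD kv.1 [])) best).get? pos
        = attrs.foldl (fun a kv => foldP kv.2 a ((idx.getD kv.1 []).filterMap (selP pos))) (best.get? pos) := by
    induction attrs with
    | nil => intro best; rfl
    | cons kv rest ih =>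
        intro best
        simp only [List.foldl_cons]
        rw [ih, bUpd_get?]
  rw [bBest, this PySem.Dict.empty, PySem.Dict.get?_empty]

theorem firstHitP_lb (sks : List String) (attrs : List (String × String)) (p q : Nat) (w : String)
    (h : firstHitP attrs p sks = some (q, w)) : p ≤ q := by
  induction sks generalizing p with
  | nil => simp [firstHitP] at h
  | cons sk rest ih =>
      rw [firstHitP] at h
      cases hg : (PySem.Dict.mk attrs).get? sk with
      | some v => rw [hg] at h; simp at h; omega
      | none => rw [hg] at h; have := ih (p + 1) h; omega

theorem firstHitP_cons (sks : List String) (k v : String) (rest : List (String × String)) (p : Nat) :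
    firstHitP ((k, v) :: rest) p sks
      = merge (((prisFrom k p sks).head?).map (fun q => (q, v))) (firstHitP rest p sks) := by
  induction sks generalizing p with
  | nil => simp [firstHitP, prisFrom, merge]
  | cons sk r ih =>
      rw [firstHitP, PySem.Dict.get?_mk_cons]
      by_cases h : sk = k
      · subst h
        simp only [beq_self_eq_true]
        rw [prisFrom, if_pos rfl]
        simp only [List.head?_cons, Option.map_some]
        rw [firstHitP]
        cases hg : (PySem.Dict.mk rest).get? sk with
        | some w => simp [merge]
        | none =>
            cases hr : firstHitP rest (p + 1) r with
            | none => simp [merge]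
            | some qw =>
                obtain ⟨q, w⟩ := qw
                have := firstHitP_lb r rest (p + 1) q w hr
                simp [merge]; omega
      · have hbe : (k == sk) = false := by simp [Ne.symm h]
        simp [hbe]
        rw [prisFrom, if_neg h]
        rw [firstHitP]
        cases hg : (PySem.Dict.mk rest).get? sk with
        | some w =>
            cases hp : (prisFrom k (p + 1) r).head? with
            | none => simp [merge]
            | some q =>
                have hq : p + 1 ≤ q :=
                  prisFrom_lb r k (p + 1) q (by
                    have := List.head?_eq_some_iff.mp hp
                    obtain ⟨t, ht⟩ := this
                    rw [ht]; exact List.mem_cons_self)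
                simp [merge]; omega
        | none => exact ih (p + 1)

theorem foldl_merge (attrs : List (String × String)) (h : String × String → Option (Nat × String))
    (a : Option (Nat × String)) :
    attrs.foldl (fun a kv => merge a (h kv)) a
      = merge a (attrs.foldl (fun a kv => merge a (h kv)) none) := by
  induction attrs generalizing a with
  | nil => cases a <;> rfl
  | cons kv rest ih =>
      simp only [List.foldl_cons]
      rw [ih (merge a (h kv)), ih (merge none (h kv)), merge_none_left, merge_assoc]

theorem firstHitP_nil (sks : List String) (p : Nat) : firstHitP [] p sks = none := by
  induction sks generalizing p with
  | nil => rfl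
  | cons sk rest ih =>
      rw [firstHitP]
      have : (PySem.Dict.mk ([] : List (String × String))).get? sk = none := rfl
      rw [this]
      exact ih (p + 1)

theorem foldl_merge_firstHitP (attrs : List (String × String)) (sks : List String) (p : Nat) :
    attrs.foldl (fun a kv => merge a (((prisFrom kv.1 p sks).head?).map (fun q => (q, kv.2)))) none
      = firstHitP attrs p sks := by
  induction attrs with
  | nil => rw [firstHitP_nil]; rfl
  | cons kv rest ih =>
      obtain ⟨k, v⟩ := kv
      simp only [List.foldl_cons]
      rw [foldl_merge, ih, merge_none_left, ← firstHitP_cons]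

theorem aPick_eq (sks : List String) (attrs : List (String × String)) (p : Nat) :
    aPick attrs sks = (firstHitP attrs p sks).map (fun qv => qv.2) := by
  induction sks generalizing p with
  | nil => rfl
  | cons sk rest ih =>
      rw [aPick, firstHitP]
      cases hg : (PySem.Dict.mk attrs).get? sk with
      | some v => simp
      | none => exact ih (p + 1)

-- main per-position characterisation of B's 'best' dict
theorem bBest_char (attrs : List (String × String)) (schema : List (String × List (String × List String))) (pos : Nat) :
    (bBest (bBuild PySem.Dict.empty [] 0 schema).2 attrs).get? pos
      = firstHitP attrs 0 ((schema.map sksOf).getD pos []) := by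
  rw [bBest_get?]
  have hidx : ∀ k : String,
      ((bBuild PySem.Dict.empty [] 0 schema).2.getD k []).filterMap (selP pos)
        = prisFrom k 0 ((schema.map sksOf).getD pos []) := by
    intro k
    rw [bBuild_getD, PySem.Dict.getD_empty, List.nil_append, occsFrom_filter]
    simp
  have hfun : (fun (a : Option (Nat × String)) (kv : String × String) =>
        foldP kv.2 a (((bBuild PySem.Dict.empty [] 0 schema).2.getD kv.1 []).filterMap (selP pos)))
      = fun a kv => merge a (((prisFrom kv.1 0 ((schema.map sksOf).getD pos [])).head?).map (fun q => (q, kv.2))) := by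
    funext a kv
    rw [hidx kv.1, foldP_sorted _ _ _ (prisFrom_sorted _ _ _)]
  rw [hfun, foldl_merge_firstHitP]

theorem out_eq (attrs : List (String × String)) (C : List String) (best : PySem.Dict Nat (Nat × String)) :
    ∀ (es : List (String × List (String × List String))) (p0 : Nat) (m : PySem.Dict String String),
    (∀ i (h : i < es.length), C.getD (p0 + i) "" = es[i].1) →
    (∀ i (h : i < es.length), best.get? (p0 + i) = firstHitP attrs 0 (sksOf es[i])) →
    (List.range' p0 es.length).foldl
        (fun (mapped : PySem.Dict String String) p =>
          match best.get? p with
          | some qv => mapped.insert (C.getD p "") qv.2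
          | none => mapped) m
      = es.foldl
        (fun (mapped : PySem.Dict String String) e =>
          match aPick attrs ((PySem.Dict.mk e.2).getD "source_keys" [e.1]) with
          | some v => mapped.insert e.1 v
          | none => mapped) m := by
  intro es
  induction es with
  | nil => intro p0 m _ _; rfl
  | cons e rest ih =>
      intro p0 m hc hb
      simp only [List.length_cons]
      rw [List.range'_succ]
      simp only [List.foldl_cons]
      have hc0 := hc 0 (by simp)
      have hb0 := hb 0 (by simp)
      simp only [Nat.add_zero, List.getElem_cons_zero] at hc0 hb0
      have hstep :
          (match best.get? p0 with
            | some qv => m.insert (C.getD p0 "") qv.2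
            | none => m)
          = (match aPick attrs ((PySem.Dict.mk e.2).getD "source_keys" [e.1]) with
            | some v => m.insert e.1 v
            | none => m) := by
        have hs : firstHitP attrs 0 ((PySem.Dict.mk e.2).getD "source_keys" [e.1])
            = firstHitP attrs 0 (sksOf e) := rfl
        rw [hb0, hc0, aPick_eq _ _ 0, hs]
        cases firstHitP attrs 0 (sksOf e) with
        | none => rfl
        | some qv => rfl
      rw [hstep]
      exact ih (p0 + 1) _
        (fun i hi => by
          have := hc (i + 1) (by simpa using Nat.succ_lt_succ hi)
          simpa [Nat.add_comm, Nat.add_assoc, Nat.add_left_comm] using this)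
        (fun i hi => by
          have := hb (i + 1) (by simpa using Nat.succ_lt_succ hi)
          simpa [Nat.add_comm, Nat.add_assoc, Nat.add_left_comm] using this)

theorem prod_eq (attrs : List (String × String)) (schema : List (String × List (String × List String))) :
    bProd (bBuild PySem.Dict.empty [] 0 schema).1 (bBuild PySem.Dict.empty [] 0 schema).2 attrs
      = aProd attrs schema := by
  rw [bProd, aProd]
  have hC : (bBuild PySem.Dict.empty [] 0 schema).1 = schema.map Prod.fst := by
    rw [bBuild_fst]; simp
  congr 1
  rw [hC]
  have hlen : (schema.map Prod.fst).length = schema.length := by simp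
  rw [hlen, List.range_eq_range']
  exact out_eq attrs (schema.map Prod.fst) _ schema 0 PySem.Dict.empty
    (fun i hi => by
      simp only [Nat.zero_add]
      rw [List.getD_eq_getElem?_getD, List.getElem?_map, List.getElem?_eq_getElem hi]
      rfl)
    (fun i hi => by
      simp only [Nat.zero_add]
      rw [bBest_char]
      congr 1
      rw [List.getD_eq_getElem?_getD, List.getElem?_map, List.getElem?_eq_getElem hi]
      rfl)

-- ===== VERDICT (by name: the statement is the Claim_ definition above) =====
theorem apply_consolidated_schema_spec : Claim_equal_apply_consolidated_schema := by
  intro all_attrs schema _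
  unfold Spec_apply_consolidated_schema apply_consolidated_schema apply_consolidated_schema_alt
  have h : ∀ (l : List (List (String × String))) (acc : List (List (String × String))),
      List.foldl (fun result attrs => result ++ [aProd attrs schema]) acc l
        = List.foldl (fun result attrs =>
            result ++ [bProd (bBuild PySem.Dict.empty [] 0 schema).1 (bBuild PySem.Dict.empty [] 0 schema).2 attrs]) acc l := by
    intro l
    induction l with
    | nil => intro acc; rfl
    | cons a t ih =>
        intro acc
        simp only [List.foldl_cons]
        rw [prod_eq, ih]
  exact h all_attrs []
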